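-- pv_equiv track=rewrite | github.com/eugenegraves/streamline_chat | query_search.py | find_most_similar_document
-- ===== SOURCE A (Python) =====
-- def find_most_similar_document(query, texts):
--     """
--     Find the document most similar to the query using simple text matching
--     """
--     # Simple approach: count word overlap
--     query_words = set(query.lower().split())
--     max_overlap = 0
--     best_match = 0
--
--     for i, text in enumerate(texts):
--         text_words = set(text.lower().split())
--         overlap = len(query_words.intersection(text_words))
--         if overlap > max_overlap:
--             max_overlap = overlap
--             best_match = i
--
--     return best_match
-- ===== SOURCE B (Python) =====
-- def find_most_similar_document(query, texts):
--     # Transposed counting: iterate distinct query words, bump a per-document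
--     # count array, then select via max + first-index instead of a running argmax.
--     qwords = list(dict.fromkeys(query.lower().split()))
--     doc_words = [set(t.lower().split()) for t in texts]
--     counts = [0] * len(texts)
--     for w in qwords:
--         counts = [c + 1 if w in ws else c for c, ws in zip(counts, doc_words)]
--     m = max(counts, default=0)
--     return counts.index(m) if m > 0 else 0
-- ===== Notes on version B (the rewrite author's own statement) =====
-- stated objective: alternative
-- what changed: B transposes the computation: instead of A's per-text set-intersection inside a running strict-'>' argmax, B precomputes the document word-sets, folds over the distinct query words bumping a per-document count array, and then selects the answer with max() plus first-index lookup.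
import Mathlib
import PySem

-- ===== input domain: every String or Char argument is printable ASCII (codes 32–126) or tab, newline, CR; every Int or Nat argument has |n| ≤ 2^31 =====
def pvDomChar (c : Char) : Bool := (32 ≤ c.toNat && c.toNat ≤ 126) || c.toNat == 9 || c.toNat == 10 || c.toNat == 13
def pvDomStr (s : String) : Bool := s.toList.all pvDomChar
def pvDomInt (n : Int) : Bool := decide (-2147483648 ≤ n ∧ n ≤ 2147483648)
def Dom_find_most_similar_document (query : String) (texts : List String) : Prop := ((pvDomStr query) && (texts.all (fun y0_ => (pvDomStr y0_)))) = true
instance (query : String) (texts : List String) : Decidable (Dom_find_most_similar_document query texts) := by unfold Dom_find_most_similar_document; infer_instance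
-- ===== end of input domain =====

-- B transposes the counting (per query word over a count array) and selects by
-- max + first index instead of a running argmax; objective: alternative, same cost.

-- ===== PORT A =====
def find_most_similar_document (query : String) (texts : List String) : Int :=
  let query_words : PySem.Set String := PySem.Set.ofList (PySem.Str.split₀ (PySem.Str.lower query))
  let st := (PySem.List.enumerate texts).foldl (fun (st : Int × Int) p =>
      let text_words : PySem.Set String := PySem.Set.ofList (PySem.Str.split₀ (PySem.Str.lower p.2))
      let overlap : Int := PySem.Set.len (PySem.Set.inter query_words text_words)
      if st.1 < overlap then (overlap, p.1) else st) ((0 : Int), (0 : Int))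
  st.2

-- ===== PORT B =====
def find_most_similar_document_alt (query : String) (texts : List String) : Int :=
  let qwords : List String := PySem.List.dedup (PySem.Str.split₀ (PySem.Str.lower query))
  let doc_words : List (PySem.Set String) := texts.map (fun t => PySem.Set.ofList (PySem.Str.split₀ (PySem.Str.lower t)))
  let counts : List Int := qwords.foldl (fun cs w =>
      (List.zip cs doc_words).map (fun p => if PySem.Set.contains p.2 w then p.1 + 1 else p.1))
      (List.replicate texts.length (0 : Int))
  let m : Int := (PySem.List.max? counts (fun x => x)).getD 0
  if 0 < m then (((PySem.List.index? counts m).getD 0 : Nat) : Int) else 0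

-- ===== PRECONDITION & SPEC =====
def Spec_find_most_similar_document (query : String) (texts : List String) (out : Int) : Prop := out = find_most_similar_document_alt query texts
instance (query : String) (texts : List String) (out : Int) : Decidable (Spec_find_most_similar_document query texts out) := by unfold Spec_find_most_similar_document; infer_instance

-- ===== CLAIM (what is proved, stated in full; the proofs are below) =====
def Claim_equal_find_most_similar_document : Prop := ∀ (query : String) (texts : List String), Dom_find_most_similar_document query texts → Spec_find_most_similar_document query texts (find_most_similar_document query texts)

-- ===== LEMMAS AND PROOFS =====

theorem pv_zip_map_eq_zipWith {α β γ : Type} (f : α → β → γ) :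
    ∀ (xs : List α) (ys : List β), (xs.zip ys).map (fun p => f p.1 p.2) = List.zipWith f xs ys := by
  intro xs
  induction xs with
  | nil => intro ys; simp
  | cons x xs ih => intro ys; cases ys <;> simp [ih]

theorem pv_zipWith_zipWith {α β γ δ : Type} (g : γ → β → δ) (h : α → β → γ) :
    ∀ (xs : List α) (ys : List β),
      List.zipWith g (List.zipWith h xs ys) ys = List.zipWith (fun a b => g (h a b) b) xs ys := by
  intro xs
  induction xs with
  | nil => intro ys; simp
  | cons x xs ih => intro ys; cases ys <;> simp [ih]

theorem pv_zipWith_fst {α β : Type} :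
    ∀ (cs : List α) (ds : List β), cs.length = ds.length →
      List.zipWith (fun c (_ : β) => c) cs ds = cs := by
  intro cs
  induction cs with
  | nil => intro ds _; simp
  | cons c cs ih => intro ds hlen; cases ds with
    | nil => simp at hlen
    | cons d ds => rw [List.zipWith_cons_cons, ih ds (by simpa using hlen)]

theorem pv_zipWith_replicate_zero {β γ : Type} (f : Int → β → γ) :
    ∀ (ys : List β), List.zipWith f (List.replicate ys.length 0) ys = ys.map (f 0) := by
  intro ys
  induction ys with
  | nil => simp
  | cons y ys ih => simp [List.replicate_succ, ih]

/-- The transposed counting loop of B computes, per position, the number of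
(distinct) query words contained in that document's word set. -/
theorem pv_counts_eq (ds : List (PySem.Set String)) :
    ∀ (Q : List String) (cs : List Int), cs.length = ds.length →
      Q.foldl (fun cs w =>
          (List.zip cs ds).map (fun p => if PySem.Set.contains p.2 w then p.1 + 1 else p.1)) cs
      = List.zipWith (fun c ws => c + ((Q.filter (fun w => PySem.Set.contains ws w)).length : Int)) cs ds := by
  intro Q
  induction Q with
  | nil =>
      intro cs hlen
      simp only [List.foldl_nil, List.filter_nil, List.length_nil, Int.natCast_zero, add_zero]
      exact (pv_zipWith_fst cs ds hlen).symm
  | cons w Q ih =>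
      intro cs hlen
      simp only [List.foldl_cons]
      rw [pv_zip_map_eq_zipWith (fun c ws => if PySem.Set.contains ws w then c + 1 else c) cs ds]
      rw [ih _ (by simp [hlen])]
      rw [pv_zipWith_zipWith]
      congr 1
      funext c ws
      rw [List.filter_cons]
      by_cases h : w ∈ ws
      · simp only [(PySem.Set.contains_iff ws w).2 h, if_true, List.length_cons]
        push_cast; ring
      · simp [h]

/-- A's loop over texts is the same fold over the precomputed overlap list. -/
theorem pv_fold_map_enum {α : Type} (f : α → Int) :
    ∀ (xs : List α) (s : Int) (st : Int × Int),
      (PySem.List.enumerate xs s).foldl (fun st p => if st.1 < f p.2 then (f p.2, p.1) else st) st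
      = (PySem.List.enumerate (xs.map f) s).foldl (fun st p => if st.1 < p.2 then (p.2, p.1) else st) st := by
  intro xs
  induction xs with
  | nil => intro s st; simp [PySem.List.enumerate_nil]
  | cons x xs ih => intro s st; simp only [List.map_cons, PySem.List.enumerate_cons, List.foldl_cons, ih]

/-- Characterisation of the strict-'>' running argmax: it returns the start
offset plus the first index of the overall maximum, provided some element
exceeds the initial best value, and the initial best index otherwise. -/
theorem pv_argmax_eq :
    ∀ (cs : List Int) (s : Int) (b : Int × Int),
      ((PySem.List.enumerate cs s).foldl (fun st p => if st.1 < p.2 then (p.2, p.1) else st) b).2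
      = if ∃ x ∈ cs, b.1 < x then s + (((PySem.List.index? cs (cs.foldl max b.1)).getD 0 : Nat) : Int) else b.2 := by
  intro cs
  induction cs with
  | nil => intro s b; simp [PySem.List.enumerate_nil]
  | cons c cs ih =>
      intro s b
      simp only [PySem.List.enumerate_cons, List.foldl_cons, List.foldl_cons (f := max)]
      by_cases hc : b.1 < c
      · rw [if_pos hc, ih]
        simp only
        have hmaxc : max b.1 c = c := max_eq_right hc.le
        rw [hmaxc]
        by_cases hx : ∃ x ∈ cs, c < x
        · obtain ⟨x, hxmem, hxlt⟩ := hx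
          have hle : x ≤ cs.foldl max c := (PySem.List.le_foldl_max cs c).2 x hxmem
          have hMgt : c < cs.foldl max c := lt_of_lt_of_le hxlt hle
          have hMne : c ≠ cs.foldl max c := ne_of_lt hMgt
          have hMmem : cs.foldl max c ∈ cs := by
            rcases PySem.List.foldl_max_mem cs c with h | h
            · exact absurd h.symm hMne
            · exact h
          rw [if_pos (⟨x, hxmem, hxlt⟩ : ∃ y ∈ cs, c < y),
              if_pos (⟨x, List.mem_cons_of_mem _ hxmem, lt_trans hc hxlt⟩ : ∃ y ∈ c :: cs, b.1 < y)]
          rw [PySem.List.index?_cons_of_ne cs hMne]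
          obtain ⟨k, hk⟩ := (PySem.List.index?_isSome_iff (xs := cs) (v := cs.foldl max c)).2 hMmem |> Option.isSome_iff_exists.1
          rw [hk]
          simp only [Option.map_some, Option.getD_some]
          push_cast; ring
        · -- everything in cs ≤ c : max is c, first index 0
          have hM : cs.foldl max c = c := by
            rcases PySem.List.foldl_max_mem cs c with h | h
            · exact h
            · have : ¬ c < cs.foldl max c := fun hlt => hx ⟨_, h, hlt⟩
              exact le_antisymm (not_lt.1 this) (PySem.List.le_foldl_max cs c).1
          rw [if_neg hx, hM, PySem.List.index?_cons_self,
              if_pos (⟨c, List.mem_cons_self, hc⟩ : ∃ y ∈ c :: cs, b.1 < y)]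
          simp
      · rw [if_neg hc, ih]
        have hmaxc : max b.1 c = b.1 := max_eq_left (not_lt.1 hc)
        rw [hmaxc]
        have hcond : (∃ x ∈ c :: cs, b.1 < x) ↔ (∃ x ∈ cs, b.1 < x) := by
          constructor
          · rintro ⟨x, hxmem, hxlt⟩
            rcases List.mem_cons.1 hxmem with rfl | h
            · exact absurd hxlt hc
            · exact ⟨x, h, hxlt⟩
          · rintro ⟨x, h, hxlt⟩; exact ⟨x, List.mem_cons_of_mem _ h, hxlt⟩
        by_cases hx : ∃ x ∈ cs, b.1 < x
        · obtain ⟨x, hxmem, hxlt⟩ := hx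
          have hle : x ≤ cs.foldl max b.1 := (PySem.List.le_foldl_max cs b.1).2 x hxmem
          have hMgtb : b.1 < cs.foldl max b.1 := lt_of_lt_of_le hxlt hle
          have hMne : c ≠ cs.foldl max b.1 := ne_of_lt (lt_of_le_of_lt (not_lt.1 hc) hMgtb)
          have hMmem : cs.foldl max b.1 ∈ cs := by
            rcases PySem.List.foldl_max_mem cs b.1 with h | h
            · exact absurd h (ne_of_gt hMgtb)
            · exact h
          rw [if_pos (⟨x, hxmem, hxlt⟩ : ∃ y ∈ cs, b.1 < y),
              if_pos (hcond.2 ⟨x, hxmem, hxlt⟩)]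
          rw [PySem.List.index?_cons_of_ne cs hMne]
          obtain ⟨k, hk⟩ := (PySem.List.index?_isSome_iff (xs := cs) (v := cs.foldl max b.1)).2 hMmem |> Option.isSome_iff_exists.1
          rw [hk]
          simp only [Option.map_some, Option.getD_some]
          push_cast; ring
        · rw [if_neg hx, if_neg (fun h => hx (hcond.1 h))]

/-- Bridging the argmax characterisation at start state (0,0) to B's
max?-plus-index? selection, for a list of nonnegative counts. -/
theorem pv_select_eq (cs : List Int) (hnn : ∀ x ∈ cs, (0 : Int) ≤ x) :
    (if ∃ x ∈ cs, (0 : Int) < x then (0 : Int) + (((PySem.List.index? cs (cs.foldl max 0)).getD 0 : Nat) : Int) else 0)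
    = (if 0 < ((PySem.List.max? cs (fun x => x)).getD 0) then
         (((PySem.List.index? cs ((PySem.List.max? cs (fun x => x)).getD 0)).getD 0 : Nat) : Int) else 0) := by
  cases cs with
  | nil =>
      have hm : PySem.List.max? ([] : List Int) (fun x => x) = none := by
        exact (PySem.List.max?_eq_none_iff [] (fun x => x)).2 rfl
      simp [hm]
  | cons c t =>
      have hc0 : (0 : Int) ≤ c := hnn c (by simp)
      have hfold : (c :: t).foldl max (0 : Int) = t.foldl max c := by
        rw [List.foldl_cons, max_eq_right hc0]
      rw [hfold, PySem.List.max?_id_cons c t]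
      simp only [Option.getD_some]
      have hcond : (∃ x ∈ c :: t, (0 : Int) < x) ↔ 0 < t.foldl max c := by
        constructor
        · rintro ⟨x, hxmem, hxlt⟩
          have hle : x ≤ t.foldl max c := by
            rcases List.mem_cons.1 hxmem with rfl | h
            · exact (PySem.List.le_foldl_max t x).1
            · exact (PySem.List.le_foldl_max t c).2 x h
          exact lt_of_lt_of_le hxlt hle
        · intro hpos
          rcases PySem.List.foldl_max_mem t c with h | h
          · exact ⟨c, by simp, h ▸ hpos⟩
          · exact ⟨_, List.mem_cons_of_mem _ h, hpos⟩
      by_cases hp : 0 < t.foldl max c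
      · rw [if_pos (hcond.2 hp), if_pos hp, zero_add]
      · rw [if_neg (fun h => hp (hcond.1 h)), if_neg hp]

-- ===== VERDICT (by name: the statement is the Claim_ definition above) =====
set_option maxHeartbeats 1000000 in
theorem find_most_similar_document_spec : Claim_equal_find_most_similar_document := by
  unfold Claim_equal_find_most_similar_document
  intro query texts _
  unfold Spec_find_most_similar_document find_most_similar_document find_most_similar_document_alt
  simp only [PySem.List.dedup_eq_ofList]
  rw [pv_counts_eq (texts.map fun t => PySem.Set.ofList (PySem.Str.split₀ (PySem.Str.lower t)))
        (PySem.Set.ofList (PySem.Str.split₀ (PySem.Str.lower query))) _ (by simp)]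
  rw [show (List.replicate texts.length (0 : Int))
        = List.replicate (texts.map fun t => PySem.Set.ofList (PySem.Str.split₀ (PySem.Str.lower t))).length (0 : Int) by simp]
  rw [pv_zipWith_replicate_zero]
  rw [pv_fold_map_enum (fun t => PySem.Set.len (PySem.Set.inter
        (PySem.Set.ofList (PySem.Str.split₀ (PySem.Str.lower query)))
        (PySem.Set.ofList (PySem.Str.split₀ (PySem.Str.lower t))))) texts 0 ((0 : Int), (0 : Int))]
  have hov : texts.map (fun t => PySem.Set.len (PySem.Set.inter
        (PySem.Set.ofList (PySem.Str.split₀ (PySem.Str.lower query)))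
        (PySem.Set.ofList (PySem.Str.split₀ (PySem.Str.lower t)))))
      = (texts.map fun t => PySem.Set.ofList (PySem.Str.split₀ (PySem.Str.lower t))).map
          (fun ws => (0 : Int) + (((PySem.Set.ofList (PySem.Str.split₀ (PySem.Str.lower query))).filter
              (fun w => PySem.Set.contains ws w)).length : Int)) := by
    rw [List.map_map]
    apply List.map_congr_left
    intro t _
    simp only [Function.comp_apply]
    rw [zero_add]
    rfl
  rw [hov, pv_argmax_eq]
  have hnn : ∀ x ∈ (texts.map fun t => PySem.Set.ofList (PySem.Str.split₀ (PySem.Str.lower t))).map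
      (fun ws => (0 : Int) + (((PySem.Set.ofList (PySem.Str.split₀ (PySem.Str.lower query))).filter
          (fun w => PySem.Set.contains ws w)).length : Int)), (0 : Int) ≤ x := by
    intro x hx
    obtain ⟨ws, _, rfl⟩ := List.mem_map.1 hx
    positivity
  exact pv_select_eq _ hnn
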